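-- pv_equiv track=rewrite | github.com/taran01/CS50x | week_6_Python/pset_6/sentimental-cash/cash.py | calculate_pennies
-- ===== SOURCE A (Python) =====
-- def calculate_pennies(cents):
--     p = 0
--     if cents < 1:
--         return p
--     n = cents
--     while n >= 1:
--         p += 1
--         n -= 1
--     return p
-- ===== SOURCE B (Python) =====
-- def calculate_pennies(cents):
--     # Closed form: the loop counts one penny per whole cent, i.e. max(cents, 0).
--     return max(cents, 0)
-- ===== Notes on version B (the rewrite author's own statement) =====
-- stated objective: faster
-- what changed: Replaced the one-at-a-time decrement loop with the closed form max(cents, 0).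
import Mathlib
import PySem

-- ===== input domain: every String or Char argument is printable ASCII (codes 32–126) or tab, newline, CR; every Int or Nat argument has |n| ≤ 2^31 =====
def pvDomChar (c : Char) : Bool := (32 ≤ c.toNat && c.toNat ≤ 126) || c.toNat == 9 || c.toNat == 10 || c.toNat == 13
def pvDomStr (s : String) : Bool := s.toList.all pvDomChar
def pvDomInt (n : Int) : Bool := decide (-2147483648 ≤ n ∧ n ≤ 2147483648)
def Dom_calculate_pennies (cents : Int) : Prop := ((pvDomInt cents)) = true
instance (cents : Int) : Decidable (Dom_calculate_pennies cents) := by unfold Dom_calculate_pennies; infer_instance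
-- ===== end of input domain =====

-- B replaces A's one-cent-at-a-time counting loop with the closed form max(cents, 0) (faster).

-- ===== PORT A =====
-- the while loop: while n >= 1: p += 1; n -= 1
def calculate_pennies_loop (n p : Int) : Int :=
  if n ≥ 1 then calculate_pennies_loop (n - 1) (p + 1) else p
termination_by n.toNat
decreasing_by omega

def calculate_pennies (cents : Int) : Int :=
  let p : Int := 0
  if cents < 1 then p
  else calculate_pennies_loop cents p

-- ===== PORT B =====
def calculate_pennies_alt (cents : Int) : Int := max cents 0

-- ===== PRECONDITION & SPEC =====
def Spec_calculate_pennies (cents : Int) (out : Int) : Prop := out = calculate_pennies_alt cents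
instance (cents : Int) (out : Int) : Decidable (Spec_calculate_pennies cents out) := by unfold Spec_calculate_pennies; infer_instance

-- ===== CLAIM (what is proved, stated in full; the proofs are below) =====
def Claim_equal_calculate_pennies : Prop := ∀ (cents : Int), Dom_calculate_pennies cents → Spec_calculate_pennies cents (calculate_pennies cents)

-- ===== LEMMAS AND PROOFS =====
theorem calculate_pennies_loop_eq (n p : Int) : calculate_pennies_loop n p = p + max n 0 := by
  by_cases h : n ≥ 1
  · have ih := calculate_pennies_loop_eq (n - 1) (p + 1)
    rw [calculate_pennies_loop, if_pos h, ih]; omega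
  · rw [calculate_pennies_loop, if_neg h]; omega
termination_by n.toNat
decreasing_by omega

-- ===== VERDICT (by name: the statement is the Claim_ definition above) =====
theorem calculate_pennies_spec : Claim_equal_calculate_pennies := by
  intro cents _
  unfold Spec_calculate_pennies calculate_pennies calculate_pennies_alt
  by_cases h : cents < 1
  · simp [h]; omega
  · simp [h, calculate_pennies_loop_eq]
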